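-- pv_equiv track=rewrite | github.com/zaimsyaddad99/Tubes-Kripto-5 | sha256.py | rotr
-- ===== SOURCE A (Python) =====
-- def rotr(num, bits, n):
--     for i in range(n):
--         num &= (2**bits-1)
--         bit = num & 1
--         num >>= 1
--         if(bit):
--             num |= (1 << (bits-1))
--
--     return num
-- ===== SOURCE B (Python) =====
-- def rotr(num, bits, n):
--     if n <= 0:
--         return num
--     if bits == 0:
--         return 0
--     mask = (1 << bits) - 1
--     num &= mask
--     k = n % bits
--     return ((num >> k) | (num << (bits - k))) & mask
-- ===== Notes on version B (the rewrite author's own statement) =====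
-- stated objective: faster
-- what changed: A rotates one bit at a time in a loop of n iterations; B computes the rotation in O(1) with a single shift-or of the masked value by n mod bits.
import Mathlib
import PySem

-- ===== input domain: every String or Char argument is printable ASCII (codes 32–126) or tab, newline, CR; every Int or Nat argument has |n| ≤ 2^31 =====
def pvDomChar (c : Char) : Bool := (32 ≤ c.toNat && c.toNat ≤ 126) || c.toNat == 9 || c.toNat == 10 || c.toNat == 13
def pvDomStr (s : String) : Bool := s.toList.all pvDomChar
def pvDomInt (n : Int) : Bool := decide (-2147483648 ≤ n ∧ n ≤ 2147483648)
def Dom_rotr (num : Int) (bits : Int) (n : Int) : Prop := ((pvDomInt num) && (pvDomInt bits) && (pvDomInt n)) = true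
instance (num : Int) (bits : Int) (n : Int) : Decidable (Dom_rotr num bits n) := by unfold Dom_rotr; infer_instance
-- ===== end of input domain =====

-- B replaces A's n-step bit-by-bit rotation loop by a single shift-or rotation using n mod bits.


-- ===== PORT A =====
-- loop body of A; '2**bits' and '1 << (bits-1)' are ported through .toNat, exact for bits ≥ 0
-- (for bits < 0 with n > 0 the Python raises TypeError, excluded by Pre_rotr)
def rotrStep (bits : Int) (num : Int) : Int :=
  let num := PySem.Int.band num (2 ^ bits.toNat - 1)
  let bit := PySem.Int.band num 1
  let num := num >>> (1 : Nat)
  if bit ≠ 0 then PySem.Int.bor num ((1 : Int) <<< (bits - 1).toNat) else num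

def rotr (num : Int) (bits : Int) (n : Int) : Int :=
  (PySem.List.pyRange 0 n 1).foldl (fun acc _ => rotrStep bits acc) num

-- ===== PORT B =====
-- shift amounts ported through .toNat: exact, since in B's own flow 0 ≤ k < bits (Pre_ gives bits ≥ 0)
def rotr_alt (num : Int) (bits : Int) (n : Int) : Int :=
  if n ≤ 0 then num
  else if bits = 0 then 0
  else
    let mask := (1 : Int) <<< bits.toNat - 1
    let num2 := PySem.Int.band num mask
    let k := PySem.Int.mod n bits
    PySem.Int.band (PySem.Int.bor (num2 >>> k.toNat) (num2 <<< (bits - k).toNat)) mask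

-- ===== PRECONDITION & SPEC =====
-- Pre_ excludes only bits < 0 with n > 0: there '2**bits' is a float and A raises TypeError on 'num &= …'.
def Pre_rotr (num : Int) (bits : Int) (n : Int) : Prop := 0 < n → 0 ≤ bits
instance (num : Int) (bits : Int) (n : Int) : Decidable (Pre_rotr num bits n) := by unfold Pre_rotr; infer_instance
def pvWitness_rotr : Int × Int × Int := (13, 8, 11)
def Spec_rotr (num : Int) (bits : Int) (n : Int) (out : Int) : Prop := out = rotr_alt num bits n
instance (num : Int) (bits : Int) (n : Int) (out : Int) : Decidable (Spec_rotr num bits n out) := by unfold Spec_rotr; infer_instance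

-- ===== CLAIM (what is proved, stated in full; the proofs are below) =====
def Claim_equal_rotr : Prop := ∀ (num : Int) (bits : Int) (n : Int), Dom_rotr num bits n → Pre_rotr num bits n → Spec_rotr num bits n (rotr num bits n)

-- ===== LEMMAS AND PROOFS =====

-- one rotate-right step / k-fold rotate-right, on Nat values below 2^b
def r1 (b x : Nat) : Nat := x / 2 + x % 2 * 2 ^ (b - 1)
def rotN (b k x : Nat) : Nat := x / 2 ^ k + x % 2 ^ k * 2 ^ (b - k)

theorem foldl_const {α β : Type} (l : List α) (g : β → β) (s : β) :
    l.foldl (fun a _ => g a) s = g^[l.length] s := by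
  induction l generalizing s with
  | nil => rfl
  | cons x xs ih => simp [List.foldl, ih, Function.iterate_succ_apply]

-- x & (2**b - 1) = x mod 2**b for EVERY Int x (Python two's-complement semantics)
theorem band_mask (x : Int) (b : Nat) : PySem.Int.band x (2 ^ b - 1) = x % ((2 ^ b : Nat) : Int) := by
  have hM : (0:Int) < ((2 ^ b : Nat) : Int) := by positivity
  have hcast : ((2:Int) ^ b - 1) = (((2 ^ b - 1 : Nat) : Int)) := by
    push_cast [Nat.one_le_two_pow]; ring
  by_cases hx : 0 ≤ x
  · rw [PySem.Int.band, if_pos hx, if_pos (by have : (1:Int) ≤ 2 ^ b := one_le_pow₀ one_le_two; omega : (0:Int) ≤ 2 ^ b - 1),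
      hcast, Int.toNat_natCast, Nat.and_two_pow_sub_one_eq_mod]
    conv_rhs => rw [← Int.toNat_of_nonneg hx]
    push_cast
    rfl
  · rw [PySem.Int.band, if_neg hx, if_pos (by have : (1:Int) ≤ 2 ^ b := one_le_pow₀ one_le_two; omega : (0:Int) ≤ 2 ^ b - 1),
      hcast, Int.toNat_natCast, Nat.and_comm, Nat.and_two_pow_sub_one_eq_mod]
    set M : Int := ((2 ^ b : Nat) : Int) with hMdef
    set y : Nat := (-x - 1).toNat with hy
    have hxy : x = -(y:Int) - 1 := by
      have := Int.toNat_of_nonneg (by omega : (0:Int) ≤ -x - 1)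
      omega
    set r : Nat := y % 2 ^ b with hr
    have hrlt : r < 2 ^ b := Nat.mod_lt _ (by positivity)
    obtain ⟨c, hc⟩ : (2 ^ b : Nat) ∣ (y - r) := Nat.dvd_sub_mod y
    have hyc : (y:Int) = M * c + r := by
      have hry : r ≤ y := Nat.mod_le _ _
      have h2 : y = 2 ^ b * c + r := by omega
      rw [hMdef]; exact_mod_cast h2
    have key : x % M = (M - 1 - (r:Int)) % M := by
      have heq : x - (M - 1 - (r:Int)) = M * (-(c:Int) - 1) := by rw [hxy, hyc]; ring
      have hdvd : M ∣ x - (M - 1 - (r:Int)) := ⟨_, heq⟩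
      have hmeq : Int.ModEq M x (M - 1 - (r:Int)) :=
        Int.modEq_iff_dvd.mpr (by rw [show M - 1 - (r:Int) - x = -(x - (M - 1 - (r:Int))) by ring]; exact dvd_neg.mpr hdvd)
      exact hmeq
    rw [key, Int.emod_eq_of_lt (by omega) (by omega)]
    rw [hMdef]; push_cast [Nat.one_le_two_pow]; omega

theorem or_pow_add {a c j : Nat} (h : a < 2 ^ j) : a ||| c * 2 ^ j = a + c * 2 ^ j := by
  have hmod : (a ||| c * 2 ^ j) % 2 ^ j = a := by
    rw [Nat.or_mod_two_pow, Nat.mod_eq_of_lt h, Nat.mul_mod_left, Nat.or_zero]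
  have hdiv : (a ||| c * 2 ^ j) / 2 ^ j = c := by
    rw [Nat.or_div_two_pow, Nat.div_eq_of_lt h, Nat.mul_div_cancel _ (by positivity), Nat.zero_or]
  have h := Nat.div_add_mod (a ||| c * 2 ^ j) (2 ^ j)
  rw [hdiv, hmod] at h
  calc a ||| c * 2 ^ j = 2 ^ j * c + a := h.symm
    _ = a + c * 2 ^ j := by ring

theorem r1_lt {b x : Nat} (hb : 1 ≤ b) (hx : x < 2 ^ b) : r1 b x < 2 ^ b := by
  obtain ⟨c, rfl⟩ : ∃ c, b = c + 1 := ⟨b - 1, by omega⟩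
  have h2 : 2 ^ (c + 1) = 2 * 2 ^ c := by ring
  unfold r1
  simp only [Nat.add_sub_cancel]
  rcases Nat.mod_two_eq_zero_or_one x with h | h <;>
    simp only [h, Nat.zero_mul, Nat.one_mul] <;> omega

theorem rotN_zero (b x : Nat) : rotN b 0 x = x := by
  simp [rotN, Nat.mod_one]

theorem rotN_self {b x : Nat} (hx : x < 2 ^ b) : rotN b b x = x := by
  simp [rotN, Nat.div_eq_of_lt hx, Nat.mod_eq_of_lt hx]

theorem rot_succ {b k x : Nat} (hk : k < b) :
    r1 b (rotN b k x) = rotN b (k + 1) x := by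
  set q := x / 2 ^ k with hq
  set r := x % 2 ^ k with hr
  set j := b - k - 1 with hj
  have hbk : b - k = j + 1 := by omega
  have hb1 : b - 1 = k + j := by omega
  have hk1 : b - (k + 1) = j := by omega
  have hpow : 2 ^ (b - k) = 2 * 2 ^ j := by rw [hbk]; ring
  unfold rotN r1
  rw [hpow, ← hq, ← hr, hb1, hk1]
  have hy : q + r * (2 * 2 ^ j) = q + r * 2 ^ j * 2 := by ring
  rw [hy]
  rw [Nat.add_mul_div_right _ _ (by norm_num : 0 < 2), Nat.add_mul_mod_self_right]
  have hdd : x / 2 ^ (k + 1) = q / 2 := by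
    rw [hq, Nat.div_div_eq_div_mul, ← pow_succ]
  have hmm : x % 2 ^ (k + 1) = q % 2 * 2 ^ k + r := by
    have h1 := Nat.div_add_mod x (2 ^ k)
    simp only [← hq, ← hr] at h1
    have h2 := Nat.div_add_mod q 2
    have h3 : 2 ^ k * q = 2 ^ (k + 1) * (q / 2) + q % 2 * 2 ^ k := by
      conv_lhs => rw [← h2]
      ring
    have hx' : x = (q % 2 * 2 ^ k + r) + 2 ^ (k + 1) * (q / 2) := by omega
    have hr2 : r < 2 ^ k := Nat.mod_lt _ (by positivity)
    have hq2 : q % 2 * 2 ^ k ≤ 2 ^ k := by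
      rcases Nat.mod_two_eq_zero_or_one q with h | h <;> rw [h] <;> omega
    have hp : 2 ^ (k + 1) = 2 ^ k * 2 := by ring
    have hlt : q % 2 * 2 ^ k + r < 2 ^ (k + 1) := by omega
    rw [hx', Nat.add_mul_mod_self_left, Nat.mod_eq_of_lt hlt]
  rw [hdd, hmm]
  ring

theorem mod_succ_lemma (m b : Nat) (hb : 1 ≤ b) (h : m % b + 1 ≠ b) : (m + 1) % b = m % b + 1 := by
  rw [← Nat.mod_add_mod]
  exact Nat.mod_eq_of_lt (by have := Nat.mod_lt m (show 0 < b by omega); omega)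

theorem r1_iter {b : Nat} (hb : 1 ≤ b) (m : Nat) {x : Nat} (hx : x < 2 ^ b) :
    (r1 b)^[m] x = rotN b (m % b) x := by
  induction m with
  | zero => simp [rotN_zero]
  | succ m ih =>
    rw [Function.iterate_succ_apply', ih]
    have hmb : m % b < b := Nat.mod_lt m (by omega)
    by_cases h : m % b + 1 = b
    · rw [rot_succ (by omega), h, rotN_self hx]
      have h0 : (m + 1) % b = 0 := by rw [← Nat.mod_add_mod, h, Nat.mod_self]
      rw [h0, rotN_zero]
    · rw [rot_succ (by omega), mod_succ_lemma m b hb h]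

-- cast helpers
theorem one_shl (k : Nat) : ((1:Int)) <<< k = ((2 ^ k : Nat) : Int) := by
  have h : (((1:Nat)):Int) <<< k = (((1 <<< k : Nat)):Int) := by simp
  rw [show ((1:Int)) = (((1:Nat)):Int) from rfl, h, Nat.shiftLeft_eq, Nat.one_mul]

theorem emod_toNat (x : Int) (M : Nat) (hM : 0 < M) :
    x % ((M:Nat):Int) = (((x % ((M:Nat):Int)).toNat : Nat) : Int) :=
  (Int.toNat_of_nonneg (Int.emod_nonneg x (by exact_mod_cast hM.ne'))).symm

-- a single A step on any Int state is r1 on the masked state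
theorem step_eq {b : Nat} (hb : 1 ≤ b) (x : Int) :
    rotrStep (b : Int) x = ((r1 b (x % ((2 ^ b : Nat) : Int)).toNat : Nat) : Int) := by
  have hM : 0 < 2 ^ b := by positivity
  have hmask : PySem.Int.band x (2 ^ ((b:Int)).toNat - 1) = x % ((2 ^ b : Nat) : Int) := by
    rw [Int.toNat_natCast]; exact band_mask x b
  set m : Nat := (x % ((2 ^ b : Nat) : Int)).toNat with hm
  have hmx : x % ((2 ^ b : Nat) : Int) = ((m:Nat):Int) := emod_toNat x (2 ^ b) hM
  have hmlt : m < 2 ^ b := by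
    have := Int.emod_lt_of_pos x (show (0:Int) < ((2 ^ b : Nat):Int) by positivity)
    omega
  rw [rotrStep, hmask, hmx]
  have hbit : PySem.Int.band ((m:Nat):Int) 1 = (((m % 2 : Nat)):Int) := by
    rw [show ((1:Int)) = (((1:Nat)):Int) from rfl, PySem.Int.band_natCast, Nat.and_one_is_mod]
  have hshr : (((m:Nat)):Int) >>> (1:Nat) = (((m / 2 : Nat)):Int) := by
    have h : (((m:Nat)):Int) >>> (1:Nat) = (((m >>> 1 : Nat)):Int) := by simp
    rw [h, Nat.shiftRight_eq_div_pow, pow_one]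
  rw [hbit, hshr]
  rcases Nat.mod_two_eq_zero_or_one m with h | h
  · rw [h, if_neg (by simp)]
    simp [r1, h]
  · rw [h, if_pos (by simp)]
    have hb1 : ((b:Int) - 1).toNat = b - 1 := by omega
    rw [hb1, one_shl, PySem.Int.bor_natCast]
    have hdisj : m / 2 < 2 ^ (b - 1) := by
      obtain ⟨c, rfl⟩ : ∃ c, b = c + 1 := ⟨b - 1, by omega⟩
      simp only [Nat.add_sub_cancel]
      have : 2 ^ (c + 1) = 2 * 2 ^ c := by ring
      omega
    have := or_pow_add (c := 1) hdisj
    rw [Nat.one_mul] at this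
    rw [this]
    simp [r1, h]

theorem step_zero (x : Int) : rotrStep 0 x = 0 := by
  have h : PySem.Int.band x (2 ^ ((0:Int)).toNat - 1) = 0 := by
    norm_num [PySem.Int.band_zero]
  rw [rotrStep, h]
  norm_num [show PySem.Int.band 0 1 = 0 from rfl]

-- A's iterate on reduced states stays reduced and tracks r1
theorem iter_eq {b : Nat} (hb : 1 ≤ b) (m : Nat) {x : Nat} (hx : x < 2 ^ b) :
    (rotrStep (b:Int))^[m] ((x:Nat):Int) = (((r1 b)^[m] x : Nat) : Int) := by
  induction m generalizing x with
  | zero => rfl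
  | succ m ih =>
    rw [Function.iterate_succ_apply, Function.iterate_succ_apply]
    have hxm : (((x:Nat):Int) % ((2 ^ b : Nat) : Int)).toNat = x := by
      rw [Int.emod_eq_of_lt (by positivity) (by exact_mod_cast hx), Int.toNat_natCast]
    rw [step_eq hb, hxm, ih (r1_lt hb hx)]

-- B's closed form
theorem alt_eq {b : Nat} (hb : 1 ≤ b) {n : Int} (hn : 0 < n) (num : Int) :
    rotr_alt num (b:Int) n = ((rotN b (n.toNat % b) (num % ((2 ^ b : Nat) : Int)).toNat : Nat) : Int) := by
  have hM : 0 < 2 ^ b := by positivity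
  rw [rotr_alt, if_neg (by omega), if_neg (by exact_mod_cast (by omega : (b:Int) ≠ 0))]
  simp only [Int.toNat_natCast]
  rw [one_shl]
  have hmaskc : (((2 ^ b : Nat) : Int)) - 1 = (2:Int) ^ b - 1 := by push_cast; ring
  rw [hmaskc, band_mask num b]
  set x0 : Nat := (num % ((2 ^ b : Nat) : Int)).toNat with hx0
  have hx0e : num % ((2 ^ b : Nat) : Int) = ((x0:Nat):Int) := emod_toNat num (2 ^ b) hM
  have hx0lt : x0 < 2 ^ b := by
    have := Int.emod_lt_of_pos num (show (0:Int) < ((2 ^ b : Nat):Int) by positivity)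
    omega
  rw [hx0e]
  set K : Nat := n.toNat % b with hK
  have hKlt : K < b := Nat.mod_lt _ (by omega)
  have hmod : PySem.Int.mod n (b:Int) = ((K:Nat):Int) := by
    rw [PySem.Int.mod, Int.fmod_eq_emod, if_pos (Or.inl (by positivity)), add_zero]
    conv_lhs => rw [← Int.toNat_of_nonneg hn.le]
    exact_mod_cast rfl
  rw [hmod, Int.toNat_natCast]
  have hsub : ((b:Int) - ((K:Nat):Int)).toNat = b - K := by omega
  rw [hsub]
  have hshr : (((x0:Nat)):Int) >>> K = (((x0 / 2 ^ K : Nat)):Int) := by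
    have h : (((x0:Nat)):Int) >>> K = (((x0 >>> K : Nat)):Int) := by simp
    rw [h, Nat.shiftRight_eq_div_pow]
  have hshl : (((x0:Nat)):Int) <<< (b - K) = (((x0 * 2 ^ (b - K) : Nat)):Int) := by
    have h : (((x0:Nat)):Int) <<< (b - K) = (((x0 <<< (b - K) : Nat)):Int) := by simp
    rw [h, Nat.shiftLeft_eq]
  rw [hshr, hshl, PySem.Int.bor_natCast]
  set v : Nat := x0 / 2 ^ K ||| x0 * 2 ^ (b - K) with hv
  rw [show ((2:Int) ^ b - 1) = (((2 ^ b : Nat) : Int)) - 1 from hmaskc.symm]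
  rw [show (((2 ^ b : Nat) : Int)) - 1 = (2:Int) ^ b - 1 from hmaskc]
  rw [band_mask ((v:Nat):Int) b]
  have hvmod : ((v:Nat):Int) % ((2 ^ b : Nat) : Int) = (((v % 2 ^ b : Nat)):Int) := by
    exact_mod_cast rfl
  rw [hvmod]
  congr 1
  -- now pure Nat: (x0/2^K ||| x0*2^(b-K)) % 2^b = rotN b K x0
  have hPQ : 2 ^ K * 2 ^ (b - K) = 2 ^ b := by rw [← pow_add]; congr 1; omega
  have hq : x0 / 2 ^ K < 2 ^ (b - K) := Nat.div_lt_of_lt_mul (by omega)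
  have hmul : x0 * 2 ^ (b - K) % 2 ^ b = x0 % 2 ^ K * 2 ^ (b - K) := by
    have hsplit := Nat.div_add_mod x0 (2 ^ K)
    have hx0eq : x0 * 2 ^ (b - K) = x0 % 2 ^ K * 2 ^ (b - K) + 2 ^ b * (x0 / 2 ^ K) := by
      calc x0 * 2 ^ (b - K) = (2 ^ K * (x0 / 2 ^ K) + x0 % 2 ^ K) * 2 ^ (b - K) := by rw [hsplit]
        _ = x0 % 2 ^ K * 2 ^ (b - K) + (2 ^ K * 2 ^ (b - K)) * (x0 / 2 ^ K) := by ring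
        _ = x0 % 2 ^ K * 2 ^ (b - K) + 2 ^ b * (x0 / 2 ^ K) := by rw [hPQ]
    rw [hx0eq, Nat.add_mul_mod_self_left, Nat.mod_eq_of_lt ?_]
    calc x0 % 2 ^ K * 2 ^ (b - K) < 2 ^ K * 2 ^ (b - K) :=
          (Nat.mul_lt_mul_right (by positivity)).mpr (Nat.mod_lt _ (by positivity))
      _ = 2 ^ b := hPQ
  rw [hv, Nat.or_mod_two_pow, Nat.mod_eq_of_lt (lt_of_lt_of_le hq (Nat.pow_le_pow_right (by norm_num) (by omega))), hmul]
  rw [or_pow_add hq]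
  rfl

-- ===== VERDICT (by name: the statement is the Claim_ definition above) =====
theorem rotr_spec : Claim_equal_rotr := by
  intro num bits n _hD hP
  unfold Spec_rotr
  rcases le_or_gt n 0 with hn | hn
  · -- empty loop on both sides
    have hlen : (PySem.List.pyRange 0 n 1).length = 0 := by
      rw [PySem.List.length_pyRange_one]; omega
    rw [rotr, foldl_const, hlen, Function.iterate_zero_apply, rotr_alt, if_pos hn]
  · have hb0 : 0 ≤ bits := hP hn
    obtain ⟨b, hbits⟩ : ∃ b : Nat, bits = (b:Int) := ⟨bits.toNat, by omega⟩
    subst hbits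
    have hlen : (PySem.List.pyRange 0 n 1).length = n.toNat := by
      rw [PySem.List.length_pyRange_one]; congr 1; omega
    obtain ⟨m, hm⟩ : ∃ m, n.toNat = m + 1 := ⟨n.toNat - 1, by omega⟩
    rw [rotr, foldl_const, hlen, hm]
    by_cases hb1 : b = 0
    · subst hb1
      have hz : ∀ (k : Nat), (rotrStep (0:Int))^[k] (0:Int) = 0 := by
        intro k
        induction k with
        | zero => rfl
        | succ k ih => rw [Function.iterate_succ_apply, step_zero]; exact ih
      rw [Function.iterate_succ_apply, show (((0:Nat)):Int) = (0:Int) from rfl, step_zero, hz]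
      rw [rotr_alt, if_neg (by omega), if_pos rfl]
    · have hbge : 1 ≤ b := by omega
      have hM : 0 < 2 ^ b := by positivity
      set x0 : Nat := (num % ((2 ^ b : Nat) : Int)).toNat with hx0
      have hx0lt : x0 < 2 ^ b := by
        have := Int.emod_lt_of_pos num (show (0:Int) < ((2 ^ b : Nat):Int) by positivity)
        omega
      rw [Function.iterate_succ_apply, step_eq hbge, ← hx0, iter_eq hbge m (r1_lt hbge hx0lt)]
      rw [← Function.iterate_succ_apply, r1_iter hbge (m + 1) hx0lt]
      rw [alt_eq hbge hn, ← hx0, hm]
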